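-- pv_equiv track=rewrite | github.com/DownToSky/Jumbled | WordsInHex/HexWords.py | ChangeToHex
-- ===== SOURCE A (Python) =====
-- def ChangeToHex(word):
--     word=word.lower()
--     outPut=""
--     for chr in word:
--         if chr=='i' or chr=='l':
--             outPut+="1"
--             continue
--         if chr=='z':
--             outPut+="2"
--             continue
--         if chr=='s':
--             outPut+="5"
--             continue
--         if chr=='a':
--             outPut+="A"
--             continue
--         if chr=='b':
--             outPut+="B"
--             continue
--         if chr=='c':
--             outPut+="C"
--             continue
--         if chr=='d':
--             outPut+="D"
--             continue
--         if chr=='e':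
--             outPut+="E"
--             continue
--         if chr=='f':
--             outPut+="F"
--             continue
--         else:
--             return None
--     return outPut
-- ===== SOURCE B (Python) =====
-- _MAP = {'i': '1', 'l': '1', 'z': '2', 's': '5', 'a': 'A',
--         'b': 'B', 'c': 'C', 'd': 'D', 'e': 'E', 'f': 'F'}
--
-- def _conv(w):
--     # divide and conquer: split the string in half, convert each half,
--     # concatenate; None (an unmappable character somewhere) propagates up
--     if len(w) == 0:
--         return ""
--     if len(w) == 1:
--         return _MAP.get(w)
--     mid = len(w) // 2
--     left = _conv(w[:mid])
--     right = _conv(w[mid:])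
--     if left is None or right is None:
--         return None
--     return left + right
--
-- def ChangeToHex(word):
--     return _conv(word.lower())
-- ===== Notes on version B (the rewrite author's own statement) =====
-- stated objective: alternative
-- what changed: Replaced A's single left-to-right accumulator loop with early return by a divide-and-conquer recursion: the lowered string is split in half, each half converted recursively (single characters looked up, None propagating upward), and the results concatenated.
import Mathlib
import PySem

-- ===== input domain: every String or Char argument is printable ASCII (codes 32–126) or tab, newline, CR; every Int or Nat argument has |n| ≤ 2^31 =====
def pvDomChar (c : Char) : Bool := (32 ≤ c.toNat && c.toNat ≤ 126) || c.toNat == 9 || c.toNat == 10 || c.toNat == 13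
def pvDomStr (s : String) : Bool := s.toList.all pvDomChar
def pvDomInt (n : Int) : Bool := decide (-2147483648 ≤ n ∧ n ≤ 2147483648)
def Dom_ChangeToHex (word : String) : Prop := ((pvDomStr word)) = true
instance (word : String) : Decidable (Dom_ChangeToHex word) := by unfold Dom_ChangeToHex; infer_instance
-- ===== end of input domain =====

-- B replaces A's left-to-right accumulator loop (early return on an unmapped char) by a
-- divide-and-conquer recursion: halve, convert each half, concatenate, None propagates (alternative; same result).

-- ===== PORT A =====
-- the chained ifs of A's loop body: the substitute character, or none (→ early return None)
def hexSub (c : Char) : Option Char :=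
  if c = 'i' ∨ c = 'l' then some '1'
  else if c = 'z' then some '2'
  else if c = 's' then some '5'
  else if c = 'a' then some 'A'
  else if c = 'b' then some 'B'
  else if c = 'c' then some 'C'
  else if c = 'd' then some 'D'
  else if c = 'e' then some 'E'
  else if c = 'f' then some 'F'
  else none

-- A's loop: accumulate outPut, early-return None on an unmapped char
def hexLoop (cs : List Char) (outPut : List Char) : Option String :=
  match cs with
  | [] => some (String.ofList outPut.reverse)
  | c :: rest =>
    match hexSub c with
    | some d => hexLoop rest (d :: outPut)
    | none => none

def ChangeToHex (word : String) : Option String :=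
  hexLoop (PySem.Chars.lower word.toList) []

-- ===== PORT B =====
-- the substitution dict _MAP
def hexMap : PySem.Dict Char Char :=
  PySem.Dict.ofList [('i','1'), ('l','1'), ('z','2'), ('s','5'), ('a','A'),
   ('b','B'), ('c','C'), ('d','D'), ('e','E'), ('f','F')]

-- _conv: divide and conquer.  Python's w[:mid] / w[mid:] with 0 ≤ mid ≤ len(w) are exactly
-- List.take mid / List.drop mid (PySem.List.slice_to / slice_from), and len(w)//2 on the
-- nonnegative length is exactly Nat division — both exact on this domain.
def hexConv (w : List Char) : Option (List Char) :=
  if _h0 : w.length = 0 then some []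
  else if _h1 : w.length = 1 then (PySem.Dict.get? hexMap w.headI).map (fun d => [d])
  else
    let mid := w.length / 2
    match hexConv (w.take mid), hexConv (w.drop mid) with
    | some l, some r => some (l ++ r)
    | _, _ => none
termination_by w.length
decreasing_by
  · simp only [List.length_take]; omega
  · simp only [List.length_drop]; omega

def ChangeToHex_alt (word : String) : Option String :=
  (hexConv (PySem.Chars.lower word.toList)).map String.ofList

-- ===== PRECONDITION & SPEC =====
def Spec_ChangeToHex (word : String) (out : Option String) : Prop := out = ChangeToHex_alt word
instance (word : String) (out : Option String) : Decidable (Spec_ChangeToHex word out) := by unfold Spec_ChangeToHex; infer_instance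

-- ===== CLAIM (what is proved, stated in full; the proofs are below) =====
def Claim_equal_ChangeToHex : Prop := ∀ (word : String), Dom_ChangeToHex word → Spec_ChangeToHex word (ChangeToHex word)

-- ===== LEMMAS AND PROOFS =====

-- the common characterisation both ports are reduced to
def hexSpec (w : List Char) : Option (List Char) :=
  if w.all (fun c => (PySem.Dict.get? hexMap c).isSome) then
    some (w.map (fun c => PySem.Dict.getD hexMap c c))
  else none

-- A's per-char chain agrees with B's dict lookup
theorem hexSub_eq_get? (c : Char) : hexSub c = PySem.Dict.get? hexMap c := by
  by_cases h1 : c = 'i'; · subst h1; decide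
  by_cases h2 : c = 'l'; · subst h2; decide
  by_cases h3 : c = 'z'; · subst h3; decide
  by_cases h4 : c = 's'; · subst h4; decide
  by_cases h5 : c = 'a'; · subst h5; decide
  by_cases h6 : c = 'b'; · subst h6; decide
  by_cases h7 : c = 'c'; · subst h7; decide
  by_cases h8 : c = 'd'; · subst h8; decide
  by_cases h9 : c = 'e'; · subst h9; decide
  by_cases h10 : c = 'f'; · subst h10; decide
  have hit : hexMap.items = [('i','1'), ('l','1'), ('z','2'), ('s','5'), ('a','A'),
      ('b','B'), ('c','C'), ('d','D'), ('e','E'), ('f','F')] := rfl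
  simp only [hexSub, h1, h2, h3, h4, h5, h6, h7, h8, h9, h10, or_self, if_false,
    PySem.Dict.get?, hit, List.find?]
  rw [beq_eq_false_iff_ne.mpr (Ne.symm h1), beq_eq_false_iff_ne.mpr (Ne.symm h2),
    beq_eq_false_iff_ne.mpr (Ne.symm h3), beq_eq_false_iff_ne.mpr (Ne.symm h4),
    beq_eq_false_iff_ne.mpr (Ne.symm h5), beq_eq_false_iff_ne.mpr (Ne.symm h6),
    beq_eq_false_iff_ne.mpr (Ne.symm h7), beq_eq_false_iff_ne.mpr (Ne.symm h8),
    beq_eq_false_iff_ne.mpr (Ne.symm h9), beq_eq_false_iff_ne.mpr (Ne.symm h10)]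
  rfl

-- loop invariant: A's loop returns hexSpec with the accumulator prepended
theorem hexLoop_char (cs : List Char) (acc : List Char) :
    hexLoop cs acc = (hexSpec cs).map (fun l => String.ofList (acc.reverse ++ l)) := by
  induction cs generalizing acc with
  | nil => simp [hexLoop, hexSpec]
  | cons c rest ih =>
    rw [hexLoop, hexSub_eq_get?]
    cases h : PySem.Dict.get? hexMap c with
    | none => simp [hexSpec, h]
    | some d =>
      have hred : (match some d with
          | some d => hexLoop rest (d :: acc)
          | none => (none : Option String)) = hexLoop rest (d :: acc) := rfl
      rw [hred, ih]
      simp only [hexSpec, List.all_cons, List.map_cons, h, Option.isSome_some, Bool.true_and]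
      split <;> simp [PySem.Dict.getD, h, List.append_assoc]

-- hexSpec glues over concatenation the way hexConv combines its halves
theorem hexSpec_append (l r : List Char) :
    (match hexSpec l, hexSpec r with
     | some a, some b => some (a ++ b)
     | _, _ => (none : Option (List Char))) = hexSpec (l ++ r) := by
  simp only [hexSpec, List.all_append, List.map_append]
  by_cases hl : l.all (fun c => (PySem.Dict.get? hexMap c).isSome) <;>
    by_cases hr : r.all (fun c => (PySem.Dict.get? hexMap c).isSome) <;>
      simp [hl, hr]

-- B's divide-and-conquer recursion computes hexSpec (strong induction on the length)
theorem hexConv_eq_spec : ∀ (n : Nat) (w : List Char), w.length ≤ n → hexConv w = hexSpec w := by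
  intro n
  induction n with
  | zero =>
    intro w hw
    have : w = [] := List.eq_nil_of_length_eq_zero (Nat.le_zero.mp hw)
    subst this
    simp [hexConv, hexSpec]
  | succ n ih =>
    intro w hw
    rw [hexConv]
    by_cases h0 : w.length = 0
    · have : w = [] := List.eq_nil_of_length_eq_zero h0
      subst this; simp [hexSpec]
    rw [dif_neg h0]
    by_cases h1 : w.length = 1
    · rw [dif_pos h1]
      obtain ⟨c, rfl⟩ := List.length_eq_one_iff.mp h1
      cases h : PySem.Dict.get? hexMap c <;>
        simp [hexSpec, PySem.Dict.getD, h]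
    · rw [dif_neg h1]
      have ht : (w.take (w.length / 2)).length ≤ n := by
        simp only [List.length_take]; omega
      have hd : (w.drop (w.length / 2)).length ≤ n := by
        simp only [List.length_drop]; omega
      simp only [ih _ ht, ih _ hd]
      rw [hexSpec_append, List.take_append_drop]

-- ===== VERDICT (by name: the statement is the Claim_ definition above) =====
theorem ChangeToHex_spec : Claim_equal_ChangeToHex := by
  intro word _
  show ChangeToHex word = ChangeToHex_alt word
  rw [ChangeToHex, ChangeToHex_alt, hexLoop_char,
    hexConv_eq_spec (PySem.Chars.lower word.toList).length _ (le_refl _)]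
  cases hexSpec (PySem.Chars.lower word.toList) <;> simp
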